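-- pv_equiv track=rewrite | github.com/Chelsy-AI/Capstone | gui/animation_gui.py | _normalize_weather_condition
-- ===== SOURCE A (Python) =====
-- def _normalize_weather_condition(condition):
--     """Normalize weather condition to standard types"""
--     if not condition:
--         return "clear"
--
--     condition = condition.lower()
--
--     # Rain patterns
--     if any(word in condition for word in ["rain", "drizzle", "shower", "precipitation"]):
--         return "rain"
--
--     # Snow patterns
--     elif any(word in condition for word in ["snow", "sleet", "blizzard", "flurries"]):
--         return "snow"
--
--     # Storm patterns
--     elif any(word in condition for word in ["thunder", "storm", "lightning"]):
--         return "storm"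
--
--     # Cloud patterns
--     elif any(word in condition for word in ["cloud", "overcast", "partly cloudy", "mostly cloudy"]):
--         return "cloudy"
--
--     # Fog/Mist patterns
--     elif any(word in condition for word in ["fog", "mist", "haze"]):
--         return "fog"
--
--     # Clear/Sunny patterns
--     elif any(word in condition for word in ["clear", "sunny", "sun"]):
--         return "sunny"
--
--     # Default
--     else:
--         return "clear"
-- ===== SOURCE B (Python) =====
-- # Single left-to-right scan over the string: at each position, prefix-match every
-- # keyword and keep the best (lowest) category rank seen anywhere; A instead runs a
-- # separate substring search per keyword group with if/elif short-circuiting.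
-- _LABELS = ["rain", "snow", "storm", "cloudy", "fog", "sunny", "clear"]
--
-- _KEYWORDS = [
--     ("rain", 0), ("drizzle", 0), ("shower", 0), ("precipitation", 0),
--     ("snow", 1), ("sleet", 1), ("blizzard", 1), ("flurries", 1),
--     ("thunder", 2), ("storm", 2), ("lightning", 2),
--     ("cloud", 3), ("overcast", 3), ("partly cloudy", 3), ("mostly cloudy", 3),
--     ("fog", 4), ("mist", 4), ("haze", 4),
--     ("clear", 5), ("sunny", 5), ("sun", 5),
-- ]
--
-- def _normalize_weather_condition(condition):
--     """Normalize weather condition to standard types (single-scan prefix matcher)."""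
--     if not condition:
--         return "clear"
--     c = condition.lower()
--     best = 6  # rank of the default "clear"
--     for i in range(len(c)):
--         tail = c[i:]
--         for kw, r in _KEYWORDS:
--             if r < best and tail.startswith(kw):
--                 best = r
--     return _LABELS[best]
-- ===== Notes on version B (the rewrite author's own statement) =====
-- stated objective: alternative
-- what changed: Instead of A's per-keyword substring searches in an if/elif group chain, B scans the string left to right once, prefix-matching every keyword at each position and keeping the minimum category rank seen, then maps the rank to a label.
import Mathlib
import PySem

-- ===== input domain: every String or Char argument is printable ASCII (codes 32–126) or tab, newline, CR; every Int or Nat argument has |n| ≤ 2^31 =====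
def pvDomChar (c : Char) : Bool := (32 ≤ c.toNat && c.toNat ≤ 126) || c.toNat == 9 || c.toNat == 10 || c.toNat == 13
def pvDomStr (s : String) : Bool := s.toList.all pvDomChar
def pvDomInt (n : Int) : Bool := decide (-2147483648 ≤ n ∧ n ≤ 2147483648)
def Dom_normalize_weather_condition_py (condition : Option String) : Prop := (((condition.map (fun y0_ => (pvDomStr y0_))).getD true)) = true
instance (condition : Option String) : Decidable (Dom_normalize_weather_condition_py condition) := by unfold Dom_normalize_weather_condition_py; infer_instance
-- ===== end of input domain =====

-- B replaces A's per-keyword substring searches (if/elif group chain) by a single left-to-right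
-- scan that prefix-matches every keyword at each position and keeps the minimum category rank;
-- objective: alternative algorithm, same asymptotic cost.

-- ===== PORT A =====
def normalize_weather_condition_py (condition : Option String) : String :=
  match condition with
  | none => "clear"
  | some s =>
    if s = "" then "clear"
    else
      let c := PySem.Str.lower s
      if ["rain", "drizzle", "shower", "precipitation"].any (fun w => PySem.Str.isIn w c) then "rain"
      else if ["snow", "sleet", "blizzard", "flurries"].any (fun w => PySem.Str.isIn w c) then "snow"
      else if ["thunder", "storm", "lightning"].any (fun w => PySem.Str.isIn w c) then "storm"
      else if ["cloud", "overcast", "partly cloudy", "mostly cloudy"].any (fun w => PySem.Str.isIn w c) then "cloudy"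
      else if ["fog", "mist", "haze"].any (fun w => PySem.Str.isIn w c) then "fog"
      else if ["clear", "sunny", "sun"].any (fun w => PySem.Str.isIn w c) then "sunny"
      else "clear"

-- ===== PORT B =====
def pvLabels : List String := ["rain", "snow", "storm", "cloudy", "fog", "sunny", "clear"]

def pvKeywords : List (String × Nat) :=
  [ ("rain", 0), ("drizzle", 0), ("shower", 0), ("precipitation", 0),
    ("snow", 1), ("sleet", 1), ("blizzard", 1), ("flurries", 1),
    ("thunder", 2), ("storm", 2), ("lightning", 2),
    ("cloud", 3), ("overcast", 3), ("partly cloudy", 3), ("mostly cloudy", 3),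
    ("fog", 4), ("mist", 4), ("haze", 4),
    ("clear", 5), ("sunny", 5), ("sun", 5) ]

def normalize_weather_condition_py_alt (condition : Option String) : String :=
  match condition with
  | none => "clear"
  | some s =>
    if s = "" then "clear"
    else
      let c := PySem.Str.lower s
      let best :=
        (PySem.List.pyRange 0 (PySem.Str.len c) 1).foldl
          (fun best i =>
            let tail := PySem.Str.slice c (some i) none
            pvKeywords.foldl
              (fun best kr =>
                if kr.2 < best && PySem.Str.startswith tail kr.1 then kr.2 else best)
              best)
          6
      -- Source B's `_LABELS[best]`: `best` is always ≤ 6, so plain in-range list indexing (exact here)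
      pvLabels.getD best "clear"

-- ===== PRECONDITION & SPEC =====
def Spec_normalize_weather_condition_py (condition : Option String) (out : String) : Prop := out = normalize_weather_condition_py_alt condition
instance (condition : Option String) (out : String) : Decidable (Spec_normalize_weather_condition_py condition out) := by unfold Spec_normalize_weather_condition_py; infer_instance

-- ===== CLAIM =====
def Claim_equal_normalize_weather_condition_py : Prop := ∀ (condition : Option String), Dom_normalize_weather_condition_py condition → Spec_normalize_weather_condition_py condition (normalize_weather_condition_py condition)

-- ===== LEMMAS AND PROOFS =====

-- A's branch rank: index (into pvLabels) of the first keyword group whose word occurs in c, 6 if none.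
def pvRankA (c : String) : Nat :=
  if ["rain", "drizzle", "shower", "precipitation"].any (fun w => PySem.Str.isIn w c) then 0
  else if ["snow", "sleet", "blizzard", "flurries"].any (fun w => PySem.Str.isIn w c) then 1
  else if ["thunder", "storm", "lightning"].any (fun w => PySem.Str.isIn w c) then 2
  else if ["cloud", "overcast", "partly cloudy", "mostly cloudy"].any (fun w => PySem.Str.isIn w c) then 3
  else if ["fog", "mist", "haze"].any (fun w => PySem.Str.isIn w c) then 4
  else if ["clear", "sunny", "sun"].any (fun w => PySem.Str.isIn w c) then 5
  else 6

theorem pvRankA_le_six (c : String) : pvRankA c ≤ 6 := by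
  unfold pvRankA; split_ifs <;> omega

-- generic guard-min fold facts
theorem pv_foldl_min_le_init {α : Type} (p : α → Bool) (f : α → Nat) (l : List α) (b : Nat) :
    l.foldl (fun acc x => if p x then min acc (f x) else acc) b ≤ b := by
  induction l generalizing b with
  | nil => simp
  | cons y l ih =>
    simp only [List.foldl_cons]
    refine le_trans (ih _) ?_
    split <;> omega

theorem pv_foldl_min_le_elem {α : Type} (p : α → Bool) (f : α → Nat) (l : List α) (b : Nat)
    {x : α} (hx : x ∈ l) (hp : p x = true) :
    l.foldl (fun acc x => if p x then min acc (f x) else acc) b ≤ f x := by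
  induction l generalizing b with
  | nil => cases hx
  | cons y l ih =>
    simp only [List.foldl_cons]
    rcases List.mem_cons.mp hx with rfl | hx'
    · refine le_trans (pv_foldl_min_le_init p f l _) ?_
      simp [hp]
    · exact ih _ hx'

theorem pv_foldl_min_cases {α : Type} (p : α → Bool) (f : α → Nat) (l : List α) (b : Nat) :
    l.foldl (fun acc x => if p x then min acc (f x) else acc) b = b ∨
      ∃ x ∈ l, p x = true ∧ l.foldl (fun acc x => if p x then min acc (f x) else acc) b = f x := by
  induction l generalizing b with
  | nil => left; rfl
  | cons y l ih =>
    simp only [List.foldl_cons]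
    rcases ih (if p y then min b (f y) else b) with h | ⟨x, hx, hp, h⟩
    · by_cases hy : p y = true
      · rw [h, if_pos hy]
        rcases Nat.le_total b (f y) with hle | hle
        · left; omega
        · right; exact ⟨y, List.mem_cons_self, hy, by omega⟩
      · left; rw [h, if_neg hy]
    · right; exact ⟨x, List.mem_cons_of_mem _ hx, hp, h⟩

-- the inner fold of B's port is a guard-min fold
theorem pv_inner_eq (tail : String) (l : List (String × Nat)) (b : Nat) :
    l.foldl (fun best kr => if kr.2 < best && PySem.Str.startswith tail kr.1 then kr.2 else best) b
      = l.foldl (fun best kr => if PySem.Str.startswith tail kr.1 then min best kr.2 else best) b := by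
  induction l generalizing b with
  | nil => rfl
  | cons y l ih =>
    simp only [List.foldl_cons]
    rw [show (if y.2 < b && PySem.Str.startswith tail y.1 then y.2 else b)
          = (if PySem.Str.startswith tail y.1 then min b y.2 else b) by
      split_ifs <;> simp_all [Nat.min_def]]
    exact ih _

-- occurrence bridge: some scan position prefix-matches kw  ↔  kw occurs in c (kw nonempty)
theorem pv_scan_iff_isIn (kw c : String) (hkw : kw.toList ≠ []) :
    (∃ i ∈ PySem.List.pyRange 0 (PySem.Str.len c) 1,
        PySem.Str.startswith (PySem.Str.slice c (some i) none) kw = true)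
      ↔ PySem.Str.isIn kw c = true := by
  rw [PySem.Str.isIn_eq, ← PySem.Chars.exists_prefix_drop_iff_isIn]
  constructor
  · rintro ⟨i, hi, hs⟩
    rw [PySem.List.mem_pyRange_one] at hi
    rw [PySem.Str.startswith_eq, PySem.Chars.startswith_iff] at hs
    refine ⟨i.toNat, ?_⟩
    rwa [PySem.Str.toList_slice, PySem.Chars.slice_eq_listSlice,
      PySem.List.slice_from _ hi.1] at hs
  · rintro ⟨j, hj⟩
    have hjlt : j < c.toList.length := by
      by_contra hge
      rw [List.drop_eq_nil_of_le (by omega)] at hj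
      exact hkw (List.prefix_nil.mp hj)
    refine ⟨(j : Int), ?_, ?_⟩
    · rw [PySem.List.mem_pyRange_one, PySem.Str.len_eq]
      constructor <;> [positivity; exact_mod_cast hjlt]
    · rw [PySem.Str.startswith_eq, PySem.Chars.startswith_iff,
        PySem.Str.toList_slice, PySem.Chars.slice_eq_listSlice,
        PySem.List.slice_from _ (by positivity)]
      simpa using hj
  
-- each matching keyword bounds A's rank from above
theorem pv_rankA_le_of_match (c : String) {kr : String × Nat} (hmem : kr ∈ pvKeywords)
    (hin : PySem.Str.isIn kr.1 c = true) : pvRankA c ≤ kr.2 := by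
  unfold pvRankA
  fin_cases hmem <;> simp_all <;> split_ifs <;> simp_all

-- if A matches some group, a keyword of exactly that rank occurs
theorem pv_match_of_rankA (c : String) (h : pvRankA c < 6) :
    ∃ kr ∈ pvKeywords, kr.2 = pvRankA c ∧ PySem.Str.isIn kr.1 c = true := by
  unfold pvRankA at h ⊢
  split_ifs at h ⊢ with h0 h1 h2 h3 h4 h5 <;>
    [skip; skip; skip; skip; skip; skip; omega] <;>
    simp only [List.any_cons, List.any_nil, Bool.or_eq_true, Bool.false_eq_true, or_false] at *
  · rcases h0 with h' | h' | h' | h'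
    exacts [⟨("rain", 0), by simp [pvKeywords], rfl, h'⟩,
      ⟨("drizzle", 0), by simp [pvKeywords], rfl, h'⟩,
      ⟨("shower", 0), by simp [pvKeywords], rfl, h'⟩,
      ⟨("precipitation", 0), by simp [pvKeywords], rfl, h'⟩]
  · rcases h1 with h' | h' | h' | h'
    exacts [⟨("snow", 1), by simp [pvKeywords], rfl, h'⟩,
      ⟨("sleet", 1), by simp [pvKeywords], rfl, h'⟩,
      ⟨("blizzard", 1), by simp [pvKeywords], rfl, h'⟩,
      ⟨("flurries", 1), by simp [pvKeywords], rfl, h'⟩]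
  · rcases h2 with h' | h' | h'
    exacts [⟨("thunder", 2), by simp [pvKeywords], rfl, h'⟩,
      ⟨("storm", 2), by simp [pvKeywords], rfl, h'⟩,
      ⟨("lightning", 2), by simp [pvKeywords], rfl, h'⟩]
  · rcases h3 with h' | h' | h' | h'
    exacts [⟨("cloud", 3), by simp [pvKeywords], rfl, h'⟩,
      ⟨("overcast", 3), by simp [pvKeywords], rfl, h'⟩,
      ⟨("partly cloudy", 3), by simp [pvKeywords], rfl, h'⟩,
      ⟨("mostly cloudy", 3), by simp [pvKeywords], rfl, h'⟩]
  · rcases h4 with h' | h' | h'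
    exacts [⟨("fog", 4), by simp [pvKeywords], rfl, h'⟩,
      ⟨("mist", 4), by simp [pvKeywords], rfl, h'⟩,
      ⟨("haze", 4), by simp [pvKeywords], rfl, h'⟩]
  · rcases h5 with h' | h' | h'
    exacts [⟨("clear", 5), by simp [pvKeywords], rfl, h'⟩,
      ⟨("sunny", 5), by simp [pvKeywords], rfl, h'⟩,
      ⟨("sun", 5), by simp [pvKeywords], rfl, h'⟩]

-- every keyword is a nonempty string
theorem pv_kw_ne {kr : String × Nat} (h : kr ∈ pvKeywords) : kr.1.toList ≠ [] := by
  have hall : pvKeywords.all (fun kr => !kr.1.toList.isEmpty) = true := by decide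
  have := List.all_eq_true.mp hall kr h
  simpa using this

-- B's double fold computes A's rank
set_option maxHeartbeats 1000000 in
theorem pv_best_eq (c : String) :
    (PySem.List.pyRange 0 (PySem.Str.len c) 1).foldl
        (fun best i =>
          pvKeywords.foldl
            (fun best kr =>
              if kr.2 < best && PySem.Str.startswith (PySem.Str.slice c (some i) none) kr.1
              then kr.2 else best)
            best)
        6
      = pvRankA c := by
  have hstep :
      (fun (best : Nat) (i : Int) =>
          pvKeywords.foldl
            (fun best kr =>
              if kr.2 < best && PySem.Str.startswith (PySem.Str.slice c (some i) none) kr.1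
              then kr.2 else best)
            best)
        = fun (acc : Nat) (i : Int) =>
            (pvKeywords.map (fun kr => (i, kr))).foldl
              (fun acc (x : Int × (String × Nat)) =>
                if PySem.Str.startswith (PySem.Str.slice c (some x.1) none) x.2.1
                then min acc x.2.2 else acc)
              acc := by
    funext b i
    rw [List.foldl_map, pv_inner_eq]
  rw [hstep, ← List.foldl_flatMap]
  have hmemL : ∀ x : Int × (String × Nat),
      x ∈ (PySem.List.pyRange 0 (PySem.Str.len c) 1).flatMap
            (fun i => pvKeywords.map (fun kr => (i, kr)))
        ↔ x.1 ∈ PySem.List.pyRange 0 (PySem.Str.len c) 1 ∧ x.2 ∈ pvKeywords := by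
    rintro ⟨i, kr⟩
    simp [List.mem_flatMap]
  have hub :
      ((PySem.List.pyRange 0 (PySem.Str.len c) 1).flatMap
          (fun i => pvKeywords.map (fun kr => (i, kr)))).foldl
        (fun acc (x : Int × (String × Nat)) =>
          if PySem.Str.startswith (PySem.Str.slice c (some x.1) none) x.2.1
          then min acc x.2.2 else acc)
        6 ≤ pvRankA c := by
    rcases Nat.lt_or_ge (pvRankA c) 6 with hlt | hge
    · rcases pv_match_of_rankA c hlt with ⟨kr, hmem, hrk, hin⟩
      rcases (pv_scan_iff_isIn kr.1 c (pv_kw_ne hmem)).mpr hin with ⟨i, hi, hs⟩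
      have hx : (i, kr) ∈ (PySem.List.pyRange 0 (PySem.Str.len c) 1).flatMap
          (fun i => pvKeywords.map (fun kr => (i, kr))) := (hmemL (i, kr)).mpr ⟨hi, hmem⟩
      have h := pv_foldl_min_le_elem
        (fun x : Int × (String × Nat) =>
          PySem.Str.startswith (PySem.Str.slice c (some x.1) none) x.2.1)
        (fun x => x.2.2)
        ((PySem.List.pyRange 0 (PySem.Str.len c) 1).flatMap
          (fun i => pvKeywords.map (fun kr => (i, kr))))
        6 hx hs
      exact le_trans h (le_of_eq hrk)
    · have h := pv_foldl_min_le_init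
        (fun x : Int × (String × Nat) =>
          PySem.Str.startswith (PySem.Str.slice c (some x.1) none) x.2.1)
        (fun x => x.2.2)
        ((PySem.List.pyRange 0 (PySem.Str.len c) 1).flatMap
          (fun i => pvKeywords.map (fun kr => (i, kr))))
        6
      exact le_trans h hge
  have hlb : pvRankA c ≤
      ((PySem.List.pyRange 0 (PySem.Str.len c) 1).flatMap
          (fun i => pvKeywords.map (fun kr => (i, kr)))).foldl
        (fun acc (x : Int × (String × Nat)) =>
          if PySem.Str.startswith (PySem.Str.slice c (some x.1) none) x.2.1
          then min acc x.2.2 else acc)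
        6 := by
    have h := pv_foldl_min_cases
      (fun x : Int × (String × Nat) =>
        PySem.Str.startswith (PySem.Str.slice c (some x.1) none) x.2.1)
      (fun x => x.2.2)
      ((PySem.List.pyRange 0 (PySem.Str.len c) 1).flatMap
        (fun i => pvKeywords.map (fun kr => (i, kr))))
      6
    rcases h with h | ⟨x, hx, hpx, h⟩
    · rw [h]; exact pvRankA_le_six c
    · rw [h]
      obtain ⟨xi, xkr⟩ := x
      rcases (hmemL (xi, xkr)).mp hx with ⟨hi, hmem⟩
      exact pv_rankA_le_of_match c hmem
        ((pv_scan_iff_isIn xkr.1 c (pv_kw_ne hmem)).mp ⟨xi, hi, hpx⟩)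
  exact Nat.le_antisymm hub hlb

-- A's if/elif chain is pvLabels indexed at pvRankA
theorem pv_A_eq (s : String) (hs : ¬ s = "") :
    normalize_weather_condition_py (some s)
      = pvLabels.getD (pvRankA (PySem.Str.lower s)) "clear" := by
  unfold normalize_weather_condition_py pvRankA
  simp only [if_neg hs]
  split_ifs <;> rfl

-- ===== VERDICT (by name: the statement is the Claim_ definition above) =====
theorem normalize_weather_condition_py_spec : Claim_equal_normalize_weather_condition_py := by
  intro condition _
  unfold Spec_normalize_weather_condition_py
  cases condition with
  | none => rfl
  | some s =>
    by_cases hs : s = ""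
    · subst hs; rfl
    · rw [pv_A_eq s hs]
      show _ = normalize_weather_condition_py_alt (some s)
      unfold normalize_weather_condition_py_alt
      simp only [if_neg hs]
      rw [pv_best_eq (PySem.Str.lower s)]
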